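-- pv_equiv track=rewrite | github.com/llizhaoxu/Efficient-HA | generate_response_AMBER.py | find_between_sequences
-- ===== SOURCE A (Python) =====
-- def find_between_sequences(tokens, start_seq, end_seq, from_index=0):
--     """在 tokens 中寻找 start_seq 与 end_seq 之间的区间，返回 (content_start, content_end)（end 为不含）"""
--     n = len(tokens)
--     m1, m2 = len(start_seq), len(end_seq)
--
--     def find_seq(seq, start):
--         for i in range(start, n - len(seq) + 1):
--             if tokens[i:i+len(seq)] == seq:
--                 return i
--         return -1
--
--     s = find_seq(start_seq, from_index)
--     if s == -1:
--         return -1, -1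
--     e = find_seq(end_seq, s + m1)
--     if e == -1:
--         return -1, -1
--     return s + m1, e
-- ===== SOURCE B (Python) =====
-- def find_between_sequences(tokens, start_seq, end_seq, from_index=0):
--     """Two-pointer element-wise matcher: keeps a match-length counter j and never
--     builds slice copies; backtracks to i+1 on mismatch."""
--     n = len(tokens)
--
--     def scan(seq, start):
--         m = len(seq)
--         i, j = start, 0
--         while True:
--             if i > n - m:
--                 return -1
--             if j == m:
--                 return i
--             if tokens[i + j] == seq[j]:
--                 j += 1
--             else:
--                 i += 1
--                 j = 0
--
--     s = scan(start_seq, from_index)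
--     if s == -1:
--         return -1, -1
--     e = scan(end_seq, s + len(start_seq))
--     if e == -1:
--         return -1, -1
--     return s + len(start_seq), e
-- ===== Notes on version B (the rewrite author's own statement) =====
-- stated objective: alternative
-- what changed: A builds and compares an m-element slice copy at every candidate position; B runs a two-pointer element-wise matcher that keeps a match-length counter j, never allocates slices, and backtracks to i+1 on mismatch.
-- outside the precondition, e.g. on find_between_sequences([2, 3, 7], [2, 3], [7], -4): A returns (-1, 2), B raises IndexError; on find_between_sequences([1], [5], [7], -3): A returns (-1, -1), B raises IndexError
import Mathlib
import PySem

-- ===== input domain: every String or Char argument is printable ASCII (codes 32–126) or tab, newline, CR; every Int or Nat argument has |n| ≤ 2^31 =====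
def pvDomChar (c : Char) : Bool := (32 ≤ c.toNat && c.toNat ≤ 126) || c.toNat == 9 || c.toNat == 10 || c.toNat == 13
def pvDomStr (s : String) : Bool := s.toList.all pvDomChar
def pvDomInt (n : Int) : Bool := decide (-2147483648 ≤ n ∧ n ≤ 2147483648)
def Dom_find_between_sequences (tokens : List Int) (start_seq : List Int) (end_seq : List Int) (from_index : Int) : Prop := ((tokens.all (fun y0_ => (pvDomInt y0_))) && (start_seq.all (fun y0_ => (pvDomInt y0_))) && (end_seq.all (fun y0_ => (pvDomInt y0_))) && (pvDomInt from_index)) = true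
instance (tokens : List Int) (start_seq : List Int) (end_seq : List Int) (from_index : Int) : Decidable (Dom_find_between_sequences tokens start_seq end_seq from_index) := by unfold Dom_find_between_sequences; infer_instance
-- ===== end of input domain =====

-- B replaces A's per-position slice building/comparison by a two-pointer element-wise
-- matcher with a match-length counter (objective: alternative decomposition, no slice copies).

-- ===== PORT A =====
-- A's inner 'for i in range(start, n - len(seq) + 1): if tokens[i:i+len(seq)] == seq: return i / return -1'
def findSeqGo (tokens seq : List Int) : List Int → Int
  | [] => -1
  | i :: rest =>
      if PySem.List.slice tokens (some i) (some (i + seq.length)) = seq then i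
      else findSeqGo tokens seq rest

def find_between_sequences (tokens : List Int) (start_seq : List Int) (end_seq : List Int) (from_index : Int) : List Int :=
  let n : Int := tokens.length
  let m1 : Int := start_seq.length
  let s := findSeqGo tokens start_seq (PySem.List.pyRange from_index (n - start_seq.length + 1) 1)
  if s = -1 then [-1, -1]
  else
    let e := findSeqGo tokens end_seq (PySem.List.pyRange (s + m1) (n - end_seq.length + 1) 1)
    if e = -1 then [-1, -1]
    else [s + m1, e]

-- ===== PORT B =====
-- Source B's 'scan': i = candidate position, j = number of elements of seq matched at i.
-- pyGet? none = Python IndexError (unreachable for 0 ≤ i, which Pre_ guarantees at call sites).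
def scanBF (tokens seq : List Int) (n : Int) : Nat → Int → Nat → Int
  | 0, _, _ => -1   -- fuel exhausted (never reached: the wrapper supplies enough fuel)
  | fuel + 1, i, j =>
      if i > n - seq.length then -1
      else if j = seq.length then i
      else
        match PySem.List.pyGet? tokens (i + j) with
        | none => -1
        | some a =>
            if seq[j]? = some a then scanBF tokens seq n fuel i (j + 1)
            else scanBF tokens seq n fuel (i + 1) 0

def scanB (tokens seq : List Int) (n : Int) (i : Int) (j : Nat) : Int :=
  scanBF tokens seq n ((n + 1 - i).toNat * (seq.length + 1) + (seq.length - j) + 1) i j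

def find_between_sequences_alt (tokens : List Int) (start_seq : List Int) (end_seq : List Int) (from_index : Int) : List Int :=
  let n : Int := tokens.length
  let s := scanB tokens start_seq n from_index 0
  if s = -1 then [-1, -1]
  else
    let e := scanB tokens end_seq n (s + start_seq.length) 0
    if e = -1 then [-1, -1]
    else [s + start_seq.length, e]

-- ===== PRECONDITION & SPEC =====
-- Pre_ excludes negative from_index (outside the task's natural domain): there A's negative
-- slice bounds clamp and can report accidental negative match positions, while B's
-- element-wise indexing may raise IndexError.
def Pre_find_between_sequences (tokens : List Int) (start_seq : List Int) (end_seq : List Int) (from_index : Int) : Prop := 0 ≤ from_index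
instance (tokens : List Int) (start_seq : List Int) (end_seq : List Int) (from_index : Int) : Decidable (Pre_find_between_sequences tokens start_seq end_seq from_index) := by unfold Pre_find_between_sequences; infer_instance
def pvWitness_find_between_sequences : List Int × List Int × List Int × Int := ([1, 2, 3, 4], [2], [4], 0)

def Spec_find_between_sequences (tokens : List Int) (start_seq : List Int) (end_seq : List Int) (from_index : Int) (out : List Int) : Prop := out = find_between_sequences_alt tokens start_seq end_seq from_index
instance (tokens : List Int) (start_seq : List Int) (end_seq : List Int) (from_index : Int) (out : List Int) : Decidable (Spec_find_between_sequences tokens start_seq end_seq from_index out) := by unfold Spec_find_between_sequences; infer_instance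

-- ===== CLAIM (what is proved, stated in full; the proofs are below) =====
def Claim_equal_find_between_sequences : Prop := ∀ (tokens : List Int) (start_seq : List Int) (end_seq : List Int) (from_index : Int), Dom_find_between_sequences tokens start_seq end_seq from_index → Pre_find_between_sequences tokens start_seq end_seq from_index → Spec_find_between_sequences tokens start_seq end_seq from_index (find_between_sequences tokens start_seq end_seq from_index)

-- ===== LEMMAS AND PROOFS =====

-- the scan/naive correspondence
lemma scanBF_eq (tokens seq : List Int) :
    ∀ (fuel : Nat) (i : Int) (j : Nat), 0 ≤ i → j ≤ seq.length →
    (tokens.drop i.toNat).take j = seq.take j →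
    ((tokens.length : Int) + 1 - i).toNat * (seq.length + 1) + (seq.length - j) < fuel →
    scanBF tokens seq tokens.length fuel i j
      = findSeqGo tokens seq (PySem.List.pyRange i ((tokens.length : Int) - seq.length + 1) 1) := by
  intro fuel
  induction fuel with
  | zero => intro i j _ _ _ h; omega
  | succ fuel ih =>
      intro i j hi hj hpre hfuel
      simp only [scanBF]
      by_cases hgt : i > (tokens.length : Int) - seq.length
      · rw [if_pos hgt, PySem.List.pyRange_one_eq_nil (by omega)]
        simp [findSeqGo]
      · rw [if_neg hgt]
        by_cases hjm : j = seq.length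
        · subst hjm
          rw [if_pos rfl, PySem.List.pyRange_one_cons (by omega)]
          have hsl : PySem.List.slice tokens (some i) (some (i + (seq.length : Int))) = seq := by
            rw [PySem.List.slice_toNat tokens hi (by omega)]
            have h1 : (i + (seq.length : Int)).toNat - i.toNat = seq.length := by omega
            rw [h1, hpre, List.take_length]
          simp [findSeqGo, hsl]
        · rw [if_neg hjm]
          have hjlt : j < seq.length := by omega
          rcases hget : PySem.List.pyGet? tokens (i + j) with _ | a
          · exfalso
            rw [PySem.List.pyGet?_of_nonneg tokens (by omega)] at hget
            have := List.getElem?_eq_none_iff.1 hget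
            omega
          · simp only []
            rw [PySem.List.pyGet?_of_nonneg tokens (by omega)] at hget
            have hcast : (i + (j : Int)).toNat = i.toNat + j := by omega
            rw [hcast] at hget
            by_cases hsome : seq[j]? = some a
            · rw [if_pos hsome]
              refine ih i (j + 1) hi (by omega) ?_ (by omega)
              rw [List.take_add_one, List.take_add_one, hpre, List.getElem?_drop, hget, hsome]
            · rw [if_neg hsome]
              rw [PySem.List.pyRange_one_cons (by omega)]
              have hsl : ¬ PySem.List.slice tokens (some i) (some (i + (seq.length : Int))) = seq := by
                intro hEq
                rw [PySem.List.slice_toNat tokens hi (by omega)] at hEq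
                have h1 : (i + (seq.length : Int)).toNat - i.toNat = seq.length := by omega
                rw [h1] at hEq
                apply hsome
                have h2 := congrArg (fun l => l[j]?) hEq
                simp only [List.getElem?_take, if_pos hjlt, List.getElem?_drop] at h2
                rw [← h2, hget]
              simp only [findSeqGo, hsl, if_false]
              have hsplit : ((tokens.length : Int) + 1 - i).toNat * (seq.length + 1)
                  = ((tokens.length : Int) + 1 - (i + 1)).toNat * (seq.length + 1) + (seq.length + 1) := by
                have h3 : ((tokens.length : Int) + 1 - i).toNat
                    = ((tokens.length : Int) + 1 - (i + 1)).toNat + 1 := by omega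
                rw [h3, Nat.add_mul, Nat.one_mul]
              exact ih (i + 1) 0 (by omega) (by omega) (by simp) (by omega)

lemma scanB_eq_findSeqGo (tokens seq : List Int) (i : Int) (j : Nat) :
    0 ≤ i → j ≤ seq.length → (tokens.drop i.toNat).take j = seq.take j →
    scanB tokens seq tokens.length i j
      = findSeqGo tokens seq (PySem.List.pyRange i ((tokens.length : Int) - seq.length + 1) 1) := by
  intro hi hj hpre
  exact scanBF_eq tokens seq _ i j hi hj hpre (by omega)

lemma findSeqGo_ge (tokens seq : List Int) (l : List Int) (a : Int)
    (hl : ∀ x ∈ l, a ≤ x) (r : Int) (hr : findSeqGo tokens seq l = r) : r = -1 ∨ a ≤ r := by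
  induction l with
  | nil => left; simpa [findSeqGo] using hr.symm
  | cons x rest ih =>
      simp only [findSeqGo] at hr
      split at hr
      · right; exact hr ▸ hl x (by simp)
      · exact ih (fun y hy => hl y (by simp [hy])) hr

-- ===== VERDICT (by name: the statement is the Claim_ definition above) =====
theorem find_between_sequences_spec : Claim_equal_find_between_sequences := by
  intro tokens start_seq end_seq from_index _ hpre
  have hfi : (0:Int) ≤ from_index := hpre
  unfold Spec_find_between_sequences find_between_sequences find_between_sequences_alt
  have h1 := scanB_eq_findSeqGo tokens start_seq from_index 0 hfi (by omega) (by simp)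
  simp only [← h1]
  set s := scanB tokens start_seq tokens.length from_index 0 with hs
  by_cases hsm : s = -1
  · simp [hsm]
  · have hge : s = -1 ∨ from_index ≤ s := by
      refine findSeqGo_ge tokens start_seq _ from_index ?_ s h1.symm
      intro x hx; exact ((PySem.List.mem_pyRange_one).1 hx).1
    have hs0 : 0 ≤ s + (start_seq.length : Int) := by
      rcases hge with h | h
      · exact absurd h hsm
      · omega
    have h2 := scanB_eq_findSeqGo tokens end_seq (s + start_seq.length) 0 hs0 (by omega) (by simp)
    simp only [hsm, if_false, ← h2]
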